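-- pv_equiv track=rewrite | github.com/UesugiNeko/SAE-Interpreter | sae_ui_backend.py | _keyword_hit_count
-- ===== SOURCE A (Python) =====
-- def _keyword_hit_count(text: str, keywords: list[str]) -> int:
--     low = str(text or "").lower()
--     if not low or not keywords:
--         return 0
--     hits = 0
--     for kw in keywords:
--         if kw and kw in low:
--             hits += 1
--     return hits
-- ===== SOURCE B (Python) =====
-- def _keyword_hit_count(text: str, keywords: list[str]) -> int:
--     # Position-driven scan: walk the lowered text once by starting position and
--     # match keywords at each offset, collecting the distinct keywords seen;
--     # then count the keyword list entries that were found.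
--     low = str(text or "").lower()
--     found = set()
--     for i in range(len(low)):
--         for kw in keywords:
--             if kw and kw not in found and low.startswith(kw, i):
--                 found.add(kw)
--     return sum(1 for kw in keywords if kw in found)
-- ===== Notes on version B (the rewrite author's own statement) =====
-- stated objective: alternative
-- what changed: B is position-driven: it scans the lowered text once by starting offset, matching keywords at each offset into a set of found keywords, then counts the keyword-list entries present in that set, instead of A's keyword-driven loop of one whole-text substring test per keyword.
import Mathlib
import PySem

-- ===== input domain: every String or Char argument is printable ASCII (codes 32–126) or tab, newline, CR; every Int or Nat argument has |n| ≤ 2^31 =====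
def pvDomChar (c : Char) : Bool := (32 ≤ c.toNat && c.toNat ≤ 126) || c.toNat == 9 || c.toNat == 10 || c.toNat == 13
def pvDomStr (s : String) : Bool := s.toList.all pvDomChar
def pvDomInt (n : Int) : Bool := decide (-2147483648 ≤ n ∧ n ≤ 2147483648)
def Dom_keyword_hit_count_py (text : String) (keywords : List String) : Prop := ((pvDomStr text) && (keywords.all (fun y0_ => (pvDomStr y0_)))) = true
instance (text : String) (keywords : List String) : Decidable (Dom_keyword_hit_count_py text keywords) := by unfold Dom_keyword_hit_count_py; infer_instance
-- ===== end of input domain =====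

-- B is position-driven (scan the text once by offset collecting a found-set) instead of A's per-keyword substring test; return values proved equal on all inputs.
-- ===== PORT A =====
def keyword_hit_count_py (text : String) (keywords : List String) : Int :=
  let low := PySem.Str.lower text
  if low = "" ∨ keywords = [] then 0
  else
    keywords.foldl
      (fun hits kw => if kw ≠ "" ∧ PySem.Str.isIn kw low then hits + 1 else hits) 0

-- ===== PORT B =====
-- 'range(len(low))' is ported as List.range over the char list's length (exact: len ≥ 0);
-- 'low.startswith(kw, i)' with 0 ≤ i is exactly kw.toList.isPrefixOf (low.drop i).
def keyword_hit_count_py_alt (text : String) (keywords : List String) : Int :=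
  let low := (PySem.Str.lower text).toList
  let found := (List.range low.length).foldl
    (fun f i => keywords.foldl
      (fun f kw =>
        if kw ≠ "" ∧ kw ∉ f ∧ kw.toList.isPrefixOf (low.drop i) = true
        then PySem.Set.add f kw else f)
      f)
    PySem.Set.empty
  keywords.foldl (fun c kw => if kw ∈ found then c + 1 else c) 0

-- ===== PRECONDITION & SPEC =====
def Spec_keyword_hit_count_py (text : String) (keywords : List String) (out : Int) : Prop := out = keyword_hit_count_py_alt text keywords
instance (text : String) (keywords : List String) (out : Int) : Decidable (Spec_keyword_hit_count_py text keywords out) := by unfold Spec_keyword_hit_count_py; infer_instance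

-- ===== CLAIM (what is proved, stated in full; the proofs are below) =====
def Claim_equal_keyword_hit_count_py : Prop := ∀ (text : String) (keywords : List String), Dom_keyword_hit_count_py text keywords → Spec_keyword_hit_count_py text keywords (keyword_hit_count_py text keywords)

-- ===== LEMMAS AND PROOFS =====

-- membership after B's inner keyword loop at one offset
theorem pv_inner_mem (low : List Char) (i : Nat) (keywords : List String)
    (s : PySem.Set String) (x : String) :
    x ∈ keywords.foldl
      (fun f kw =>
        if kw ≠ "" ∧ kw ∉ f ∧ kw.toList.isPrefixOf (low.drop i) = true
        then PySem.Set.add f kw else f) s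
    ↔ x ∈ s ∨ (x ∈ keywords ∧ x ≠ "" ∧ x.toList.isPrefixOf (low.drop i) = true) := by
  induction keywords generalizing s with
  | nil => simp
  | cons kw rest ih =>
    simp only [List.foldl_cons]
    by_cases h : kw ≠ "" ∧ kw ∉ s ∧ kw.toList.isPrefixOf (low.drop i) = true
    · rw [if_pos h, ih]
      simp only [PySem.Set.mem_add, List.mem_cons]
      constructor
      · rintro ((hx | rfl) | ⟨hm, hne, hp⟩)
        · exact Or.inl hx
        · exact Or.inr ⟨Or.inl rfl, h.1, h.2.2⟩
        · exact Or.inr ⟨Or.inr hm, hne, hp⟩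
      · rintro (hx | ⟨(rfl | hm), hne, hp⟩)
        · exact Or.inl (Or.inl hx)
        · exact Or.inl (Or.inr rfl)
        · exact Or.inr ⟨hm, hne, hp⟩
    · rw [if_neg h, ih]
      simp only [List.mem_cons]
      constructor
      · rintro (hx | ⟨hm, hne, hp⟩)
        · exact Or.inl hx
        · exact Or.inr ⟨Or.inr hm, hne, hp⟩
      · rintro (hx | ⟨(rfl | hm), hne, hp⟩)
        · exact Or.inl hx
        · exact Or.inl (by by_contra hxs; exact h ⟨hne, hxs, hp⟩)
        · exact Or.inr ⟨hm, hne, hp⟩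

-- membership after B's outer position loop
theorem pv_outer_mem (low : List Char) (keywords : List String) (P : List Nat)
    (s : PySem.Set String) (x : String) :
    x ∈ P.foldl
      (fun f i => keywords.foldl
        (fun f kw =>
          if kw ≠ "" ∧ kw ∉ f ∧ kw.toList.isPrefixOf (low.drop i) = true
          then PySem.Set.add f kw else f) f) s
    ↔ x ∈ s ∨ (x ∈ keywords ∧ x ≠ "" ∧ ∃ i ∈ P, x.toList.isPrefixOf (low.drop i) = true) := by
  induction P generalizing s with
  | nil => simp
  | cons i P ih =>
    simp only [List.foldl_cons]
    rw [ih, pv_inner_mem]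
    constructor
    · rintro ((hx | ⟨hm, hne, hp⟩) | ⟨hm, hne, j, hj, hp⟩)
      · exact Or.inl hx
      · exact Or.inr ⟨hm, hne, i, List.mem_cons_self, hp⟩
      · exact Or.inr ⟨hm, hne, j, List.mem_cons_of_mem _ hj, hp⟩
    · rintro (hx | ⟨hm, hne, j, hj, hp⟩)
      · exact Or.inl (Or.inl hx)
      · rcases List.mem_cons.mp hj with rfl | hj'
        · exact Or.inl (Or.inr ⟨hm, hne, hp⟩)
        · exact Or.inr ⟨hm, hne, j, hj', hp⟩

-- a bounded starting offset suffices for a nonempty keyword: 'kw in low' as a position scan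
theorem pv_scan_iff (low : List Char) (kw : String) (hne : kw ≠ "") :
    (∃ i ∈ List.range low.length, kw.toList.isPrefixOf (low.drop i) = true)
    ↔ PySem.Chars.isIn kw.toList low = true := by
  rw [← PySem.Chars.exists_prefix_drop_iff_isIn]
  constructor
  · rintro ⟨i, _, hp⟩
    exact ⟨i, List.isPrefixOf_iff_prefix.mp hp⟩
  · rintro ⟨j, hp⟩
    by_cases hj : j < low.length
    · exact ⟨j, List.mem_range.mpr hj, List.isPrefixOf_iff_prefix.mpr hp⟩
    · exfalso
      rw [List.drop_eq_nil_of_le (le_of_not_gt hj), List.prefix_nil] at hp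
      have h2 := congrArg String.ofList hp
      simp at h2
      exact hne h2

-- A as a countP over the keyword list
theorem pv_countP_zero (keywords : List String) :
    keywords.countP (fun kw => decide (kw ≠ "" ∧ PySem.Str.isIn kw "" = true)) = 0 := by
  apply List.countP_eq_zero.mpr
  intro kw _
  simp only [decide_eq_true_eq, not_and]
  intro hne hin
  have hinf : kw.toList <:+: ("" : String).toList := (PySem.Str.isIn_iff_infix kw "").mp hin
  simp only [String.toList_empty, List.infix_nil] at hinf
  have h2 := congrArg String.ofList hinf
  simp at h2
  exact hne h2

theorem pv_A_eq (text : String) (keywords : List String) :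
    keyword_hit_count_py text keywords
      = ((keywords.countP (fun kw => decide (kw ≠ "" ∧ PySem.Str.isIn kw (PySem.Str.lower text) = true)) : Nat) : Int) := by
  simp only [keyword_hit_count_py]
  by_cases h : PySem.Str.lower text = "" ∨ keywords = []
  · rw [if_pos h]
    rcases h with h | h
    · rw [h, pv_countP_zero]; simp
    · subst h; simp
  · rw [if_neg h, PySem.List.foldl_ite_add_one, zero_add]

set_option maxHeartbeats 1600000 in
theorem pv_alt_eq (text : String) (keywords : List String) :
    keyword_hit_count_py_alt text keywords
      = ((keywords.countP (fun kw => decide (kw ≠ "" ∧ PySem.Str.isIn kw (PySem.Str.lower text) = true)) : Nat) : Int) := by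
  simp only [keyword_hit_count_py_alt]
  rw [PySem.List.foldl_ite_add_one, zero_add]
  congr 1
  apply List.countP_congr
  intro kw hkw
  simp only [decide_eq_true_eq]
  rw [pv_outer_mem]
  constructor
  · rintro (hx | ⟨_, hne, hex⟩)
    · simp [PySem.Set.empty] at hx
    · refine ⟨hne, ?_⟩
      rw [PySem.Str.isIn_eq]
      exact (pv_scan_iff _ kw hne).mp hex
  · rintro ⟨hne, hin⟩
    rw [PySem.Str.isIn_eq] at hin
    exact Or.inr ⟨hkw, hne, (pv_scan_iff _ kw hne).mpr hin⟩

-- ===== VERDICT (by name: the statement is the Claim_ definition above) =====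
theorem keyword_hit_count_py_spec : Claim_equal_keyword_hit_count_py := by
  intro text keywords _
  unfold Spec_keyword_hit_count_py
  rw [pv_A_eq, pv_alt_eq]
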